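-- pv_equiv track=rewrite | github.com/google-gazzza/algorithm | codewars/6kyu/rectangle-into-squares/dduck-rectangle-into-squares.py | sqInRect
-- ===== SOURCE A (Python) =====
-- def sqInRect(a, b):
--     result = []
--     while a > 0:
--         if b > a:
--             a, b = b, a
--         a -= b
--         result.append(b)
--
--     return result if len(result) > 1 else None
-- ===== SOURCE B (Python) =====
-- def sqInRect(a, b):
--     res = []
--     while a > 0 and b > 0:
--         if a < b:
--             a, b = b, a
--         q, a = divmod(a, b)
--         for _ in range(q):
--             res.append(b)
--     return res if len(res) > 1 else None
-- ===== Notes on version B (the rewrite author's own statement) =====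
-- stated objective: faster
-- what changed: Replaces repeated subtraction (recompute swap test and subtraction once per square) by the Euclidean division form: one divmod per distinct square size, then the whole batch of equal squares is appended; only O(log min(a,b)) outer steps instead of one per square.
import Mathlib
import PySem

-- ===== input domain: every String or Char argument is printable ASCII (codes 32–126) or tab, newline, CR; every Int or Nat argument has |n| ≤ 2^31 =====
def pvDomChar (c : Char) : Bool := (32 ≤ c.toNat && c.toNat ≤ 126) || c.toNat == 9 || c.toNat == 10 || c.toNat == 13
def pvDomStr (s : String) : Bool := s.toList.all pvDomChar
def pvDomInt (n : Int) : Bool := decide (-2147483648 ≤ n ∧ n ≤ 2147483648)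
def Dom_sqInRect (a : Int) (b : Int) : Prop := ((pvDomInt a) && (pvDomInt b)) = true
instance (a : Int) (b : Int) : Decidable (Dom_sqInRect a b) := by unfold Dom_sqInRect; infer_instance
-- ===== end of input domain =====

-- B replaces A's one-square-per-iteration subtraction loop by the Euclidean division form
-- (one divmod batch per outer step). Python A diverges when a > 0 and b ≤ 0; both PORTS guard the
-- loop with 0 < a ∧ 0 < b (returning the accumulator there), so the ports are equal on ALL inputs.

-- ===== PORT A =====
-- A's while loop; the extra `0 < b` guard only makes the recursion total (Python A
-- never terminates when 0 < a and b ≤ 0; nothing is claimed about Python behaviour there).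
def loopA (a b : Int) (acc : List Int) : List Int :=
  if h : 0 < a ∧ 0 < b then
    if b > a then loopA (b - a) a (acc ++ [a])
    else loopA (a - b) b (acc ++ [b])
  else acc
termination_by (a + b).toNat
decreasing_by all_goals omega

def sqInRect (a : Int) (b : Int) : Option (List Int) :=
  let result := loopA a b []
  if result.length > 1 then some result else none

-- ===== PORT B =====
def loopB (a b : Int) (acc : List Int) : List Int :=
  if h : 0 < a ∧ 0 < b then
    if a < b then
      loopB (PySem.Int.mod b a) a
        ((List.range (PySem.Int.floordiv b a).toNat).foldl (fun l _ => l ++ [a]) acc)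
    else
      loopB (PySem.Int.mod a b) b
        ((List.range (PySem.Int.floordiv a b).toNat).foldl (fun l _ => l ++ [b]) acc)
  else acc
termination_by (a + b).toNat
decreasing_by
  · rw [PySem.Int.mod_eq_emod_of_pos h.1]
    have h1 := Int.emod_nonneg b (by omega : a ≠ 0)
    have h2 := Int.emod_lt_of_pos b h.1
    omega
  · rw [PySem.Int.mod_eq_emod_of_pos h.2]
    have h1 := Int.emod_nonneg a (by omega : b ≠ 0)
    have h2 := Int.emod_lt_of_pos a h.2
    omega

def sqInRect_alt (a : Int) (b : Int) : Option (List Int) :=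
  let res := loopB a b []
  if res.length > 1 then some res else none

-- ===== PRECONDITION & SPEC =====
def Spec_sqInRect (a : Int) (b : Int) (out : Option (List Int)) : Prop := out = sqInRect_alt a b
instance (a : Int) (b : Int) (out : Option (List Int)) : Decidable (Spec_sqInRect a b out) := by unfold Spec_sqInRect; infer_instance

-- ===== CLAIM (what is proved, stated in full; the proofs are below) =====
def Claim_equal_sqInRect : Prop := ∀ (a : Int) (b : Int), Dom_sqInRect a b → Spec_sqInRect a b (sqInRect a b)

-- ===== LEMMAS AND PROOFS =====

-- B's inner `for _ in range(q): res.append(b)` loop appends q copies of b.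
lemma foldl_append_replicate (n : Nat) (b : Int) (acc : List Int) :
    (List.range n).foldl (fun l _ => l ++ [b]) acc = acc ++ List.replicate n b := by
  induction n generalizing acc with
  | zero => simp
  | succ n ih =>
    rw [List.range_succ, List.foldl_append]
    rw [ih]
    simp [List.replicate_succ']

-- Repeated subtraction of b from a (no swap ever fires while b ≤ a) equals one division batch.
lemma loopA_batch (n : Nat) (a b : Int) (acc : List Int)
    (hb : 0 < b) (ha : 0 ≤ a) (hn : a.toNat ≤ n) :
    loopA a b acc = loopA (a % b) b (acc ++ List.replicate (a / b).toNat b) := by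
  induction n generalizing a acc with
  | zero =>
    have ha0 : a = 0 := by omega
    subst ha0
    simp
  | succ n ih =>
    by_cases hab : a < b
    · rw [Int.emod_eq_of_lt ha hab, Int.ediv_eq_zero_of_lt ha hab]
      simp
    · push Not at hab
      have h1 : 0 < a := by omega
      rw [loopA]
      rw [dif_pos ⟨h1, hb⟩, if_neg (by omega)]
      rw [ih (a - b) (acc ++ [b]) (by omega) (by omega)]
      have hmod : (a - b) % b = a % b := Int.sub_emod_right a b
      have hdiv : (a - b) / b = a / b - 1 := by
        have := Int.add_mul_ediv_right a (-1) (by omega : b ≠ 0)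
        have : (a + -1 * b) / b = a / b + -1 := this
        have he : a - b = a + -1 * b := by ring
        rw [he, this]; ring
      have hq1 : 1 ≤ a / b := by
        rw [Int.le_ediv_iff_mul_le hb]; omega
      have hrep : List.replicate (a / b).toNat b = b :: List.replicate (a / b - 1).toNat b := by
        have : (a / b).toNat = (a / b - 1).toNat + 1 := by omega
        rw [this, List.replicate_succ]
      rw [hmod, hdiv, hrep]
      simp

lemma loops_eq (n : Nat) (a b : Int) (acc : List Int) (hn : (a + b).toNat ≤ n) :
    loopA a b acc = loopB a b acc := by
  induction n generalizing a b acc with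
  | zero =>
    rw [loopA, loopB]
    by_cases h : 0 < a ∧ 0 < b
    · omega
    · rw [dif_neg h, dif_neg h]
  | succ n ih =>
    rw [loopA, loopB]
    by_cases h : 0 < a ∧ 0 < b
    · obtain ⟨ha, hb⟩ := h
      rw [dif_pos ⟨ha, hb⟩, dif_pos ⟨ha, hb⟩]
      by_cases hab : a < b
      · rw [if_pos (by omega), if_pos hab]
        rw [loopA_batch (b - a).toNat (b - a) a (acc ++ [a]) ha (by omega) (le_refl _)]
        have hmod : (b - a) % a = b % a := Int.sub_emod_right b a
        have hdiv : (b - a) / a = b / a - 1 := by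
          have := Int.add_mul_ediv_right b (-1) (by omega : a ≠ 0)
          have h2 : (b + -1 * a) / a = b / a + -1 := this
          have he : b - a = b + -1 * a := by ring
          rw [he, h2]; ring
        have hq1 : 1 ≤ b / a := by rw [Int.le_ediv_iff_mul_le ha]; omega
        have hrep : List.replicate (b / a).toNat a = a :: List.replicate (b / a - 1).toNat a := by
          have : (b / a).toNat = (b / a - 1).toNat + 1 := by omega
          rw [this, List.replicate_succ]
        rw [hmod, hdiv]
        rw [PySem.Int.mod_eq_emod_of_pos ha, PySem.Int.floordiv_eq_ediv_of_pos ha]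
        have hlt : (b % a + a).toNat ≤ n := by
          have h1 : 0 ≤ b % a := Int.emod_nonneg b (by omega)
          have h2 : b % a < a := Int.emod_lt_of_pos b ha
          omega
        rw [ih (b % a) a _ hlt, foldl_append_replicate, hrep]
        simp
      · rw [if_neg (by omega), if_neg hab]
        push Not at hab
        rw [loopA_batch (a - b).toNat (a - b) b (acc ++ [b]) hb (by omega) (le_refl _)]
        have hmod : (a - b) % b = a % b := Int.sub_emod_right a b
        have hdiv : (a - b) / b = a / b - 1 := by
          have := Int.add_mul_ediv_right a (-1) (by omega : b ≠ 0)
          have h2 : (a + -1 * b) / b = a / b + -1 := this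
          have he : a - b = a + -1 * b := by ring
          rw [he, h2]; ring
        have hq1 : 1 ≤ a / b := by rw [Int.le_ediv_iff_mul_le hb]; omega
        have hrep : List.replicate (a / b).toNat b = b :: List.replicate (a / b - 1).toNat b := by
          have : (a / b).toNat = (a / b - 1).toNat + 1 := by omega
          rw [this, List.replicate_succ]
        rw [hmod, hdiv]
        rw [PySem.Int.mod_eq_emod_of_pos hb, PySem.Int.floordiv_eq_ediv_of_pos hb]
        have hlt : (a % b + b).toNat ≤ n := by
          have h1 : 0 ≤ a % b := Int.emod_nonneg a (by omega)
          have h2 : a % b < b := Int.emod_lt_of_pos a hb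
          omega
        rw [ih (a % b) b _ hlt, foldl_append_replicate, hrep]
        simp
    · rw [dif_neg h, dif_neg h]

-- ===== VERDICT (by name: the statement is the Claim_ definition above) =====
theorem sqInRect_spec : Claim_equal_sqInRect := by
  intro a b _
  unfold Spec_sqInRect sqInRect sqInRect_alt
  rw [loops_eq (a + b).toNat a b [] (le_refl _)]
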